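-- pv_equiv track=rewrite | github.com/yeagerd/adminee | services/shipments/routers/tracking_events.py | _detect_carrier_from_tracking_number
-- ===== SOURCE A (Python) =====
-- def _detect_carrier_from_tracking_number(tracking_number: str) -> str:
--     """
--     Attempt to detect carrier from tracking number format
--
--     This is a fallback when carrier detection from sender domain fails
--     """
--     # Remove any non-alphanumeric characters
--     clean_number = "".join(c for c in tracking_number if c.isalnum()).upper()
--
--     # UPS tracking numbers are typically 18 characters and start with 1Z
--     if clean_number.startswith("1Z") and len(clean_number) == 18:
--         return "UPS"
--
--     # FedEx tracking numbers are typically 12-15 characters and start with various prefixes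
--     fedex_prefixes = [
--         "7946",
--         "7947",
--         "7948",
--         "7949",
--         "7950",
--         "7951",
--         "7952",
--         "7953",
--         "7954",
--         "7955",
--     ]
--     if any(clean_number.startswith(prefix) for prefix in fedex_prefixes):
--         return "FedEx"
--
--     # USPS tracking numbers are typically 20-22 characters and start with 9400, 9205, 9303, etc.
--     usps_prefixes = [
--         "9400",
--         "9205",
--         "9303",
--         "9301",
--         "9401",
--         "9402",
--         "9403",
--         "9404",
--         "9405",
--         "9406",
--         "9407",
--         "9408",
--         "9409",
--     ]
--     if any(clean_number.startswith(prefix) for prefix in usps_prefixes):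
--         return "USPS"
--
--     # DHL tracking numbers are typically 10-11 characters and start with various prefixes
--     dhl_prefixes = [
--         "000",
--         "111",
--         "222",
--         "333",
--         "444",
--         "555",
--         "666",
--         "777",
--         "888",
--         "999",
--     ]
--     if any(clean_number.startswith(prefix) for prefix in dhl_prefixes):
--         return "DHL"
--
--     # Default to unknown if no pattern matches
--     return "Unknown"
-- ===== SOURCE B (Python) =====
-- # Arithmetic re-implementation: instead of scanning prefix lists, fold the first
-- # four characters into a number and test closed-form ranges (FedEx 7946..7955,
-- # USPS 9400..9409 or 9205/9301/9303); DHL is "first three characters are the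
-- # same digit". No prefix tables or scans at all.
-- def _detect_carrier_from_tracking_number(tracking_number: str) -> str:
--     clean = "".join(c for c in tracking_number if c.isalnum()).upper()
--     if clean.startswith("1Z") and len(clean) == 18:
--         return "UPS"
--     head = clean[:4]
--     if head.isdigit():
--         n = 0
--         for c in head:
--             n = 10 * n + (ord(c) - 48)
--         if 7946 <= n <= 7955:
--             return "FedEx"
--         if 9400 <= n <= 9409 or n in (9205, 9301, 9303):
--             return "USPS"
--     if len(clean) >= 3 and clean[0] == clean[1] == clean[2] and clean[0].isdigit():
--         return "DHL"
--     return "Unknown"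
-- ===== Notes on version B (the rewrite author's own statement) =====
-- stated objective: alternative
-- what changed: Replaces the three any(startswith)-scans over hard-coded prefix lists by arithmetic: the first four characters are folded into a number tested against closed-form ranges (FedEx 7946..7955, USPS 9400..9409 or 9205/9301/9303), and DHL becomes the check that the first three characters are one repeated digit.
import Mathlib
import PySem

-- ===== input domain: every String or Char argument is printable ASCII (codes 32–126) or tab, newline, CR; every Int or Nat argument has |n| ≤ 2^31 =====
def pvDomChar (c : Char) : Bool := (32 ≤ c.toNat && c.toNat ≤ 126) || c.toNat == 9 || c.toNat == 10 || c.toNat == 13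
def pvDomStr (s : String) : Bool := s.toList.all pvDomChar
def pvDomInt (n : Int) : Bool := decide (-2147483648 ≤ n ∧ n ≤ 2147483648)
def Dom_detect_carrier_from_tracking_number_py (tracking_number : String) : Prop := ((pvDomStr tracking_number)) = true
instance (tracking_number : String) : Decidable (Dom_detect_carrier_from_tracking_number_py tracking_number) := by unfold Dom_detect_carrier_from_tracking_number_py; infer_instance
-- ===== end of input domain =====

-- B replaces A's three any(startswith)-scans over hard-coded prefix lists by arithmetic:
-- the first four cleaned characters are folded into a number tested against closed-form
-- ranges, and DHL becomes "the first three characters are one repeated digit" (alternative).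

-- ===== PORT A =====
def pvFedexPrefixes : List (List Char) :=
  ["7946".toList, "7947".toList, "7948".toList, "7949".toList, "7950".toList,
   "7951".toList, "7952".toList, "7953".toList, "7954".toList, "7955".toList]

def pvUspsPrefixes : List (List Char) :=
  ["9400".toList, "9205".toList, "9303".toList, "9301".toList, "9401".toList,
   "9402".toList, "9403".toList, "9404".toList, "9405".toList, "9406".toList,
   "9407".toList, "9408".toList, "9409".toList]

def pvDhlPrefixes : List (List Char) :=
  ["000".toList, "111".toList, "222".toList, "333".toList, "444".toList,
   "555".toList, "666".toList, "777".toList, "888".toList, "999".toList]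

def detect_carrier_from_tracking_number_py (tracking_number : String) : String :=
  let clean_number : List Char :=
    PySem.Chars.upper (tracking_number.toList.filter PySem.Chars.isalnum)
  if PySem.Chars.startswith clean_number "1Z".toList && clean_number.length == 18 then
    "UPS"
  else if pvFedexPrefixes.any (fun p => PySem.Chars.startswith clean_number p) then
    "FedEx"
  else if pvUspsPrefixes.any (fun p => PySem.Chars.startswith clean_number p) then
    "USPS"
  else if pvDhlPrefixes.any (fun p => PySem.Chars.startswith clean_number p) then
    "DHL"
  else
    "Unknown"

-- ===== PORT B =====
-- last two lines of Source B: "same repeated digit in the first three characters → DHL"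
-- (the 'len(clean) >= 3' guard is the match on three leading characters; ord(c) is c.toNat, exact for any char)
def pvDhlFallback (clean : List Char) : String :=
  match clean with
  | c0 :: c1 :: c2 :: _ =>
    if c0 == c1 && c1 == c2 && PySem.Chars.isdigit c0 then "DHL" else "Unknown"
  | _ => "Unknown"

def detect_carrier_from_tracking_number_py_alt (tracking_number : String) : String :=
  let clean : List Char :=
    PySem.Chars.upper (tracking_number.toList.filter PySem.Chars.isalnum)
  if PySem.Chars.startswith clean "1Z".toList && clean.length == 18 then
    "UPS"
  else
    let head := PySem.List.slice clean none (some 4)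
    if PySem.Chars.strIsdigit head then
      let n : Int := head.foldl (fun n c => 10 * n + ((c.toNat : Int) - 48)) 0
      if 7946 ≤ n ∧ n ≤ 7955 then "FedEx"
      else if (9400 ≤ n ∧ n ≤ 9409) ∨ n = 9205 ∨ n = 9301 ∨ n = 9303 then "USPS"
      else pvDhlFallback clean
    else pvDhlFallback clean

-- ===== PRECONDITION & SPEC =====
def Spec_detect_carrier_from_tracking_number_py (tracking_number : String) (out : String) : Prop := out = detect_carrier_from_tracking_number_py_alt tracking_number
instance (tracking_number : String) (out : String) : Decidable (Spec_detect_carrier_from_tracking_number_py tracking_number out) := by unfold Spec_detect_carrier_from_tracking_number_py; infer_instance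

-- ===== CLAIM (what is proved, stated in full; the proofs are below) =====
def Claim_equal_detect_carrier_from_tracking_number_py : Prop := ∀ (tracking_number : String), Dom_detect_carrier_from_tracking_number_py tracking_number → Spec_detect_carrier_from_tracking_number_py tracking_number (detect_carrier_from_tracking_number_py tracking_number)

-- ===== LEMMAS AND PROOFS =====

lemma pv_sw_take (L p : List Char) :
    PySem.Chars.startswith L p = decide (L.take p.length = p) := by
  by_cases hq : L.take p.length = p
  · simp only [hq, decide_true]
    rw [PySem.Chars.startswith_iff, List.prefix_iff_eq_take]
    exact hq.symm
  · simp only [hq, decide_false]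
    rw [← Bool.not_eq_true, PySem.Chars.startswith_iff, List.prefix_iff_eq_take]
    exact fun h => hq h.symm
lemma pv_digit_bounds {c : Char} (h : PySem.Chars.isdigit c = true) :
    48 ≤ c.toNat ∧ c.toNat ≤ 57 := by
  simp only [PySem.Chars.isdigit, Bool.and_eq_true, decide_eq_true_eq, Char.le_def,
    UInt32.le_iff_toNat_le, Char.toNat_val] at h
  simpa using h
lemma pv_char_eq {c c' : Char} (h : c.toNat = c'.toNat) : c = c' := by
  rw [← Char.ofNat_toNat c, h, Char.ofNat_toNat]

lemma pv_char_of_toNat {c : Char} {n : Nat} (h : c.toNat = n) : c = Char.ofNat n := by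
  rw [← h]; exact (Char.ofNat_toNat c).symm

lemma pv_dhl (L : List Char) :
    (if pvDhlPrefixes.any (fun p => PySem.Chars.startswith L p) then "DHL" else "Unknown")
      = pvDhlFallback L := by
  match L with
  | [] => simp [pvDhlPrefixes, pv_sw_take, pvDhlFallback]
  | [c0] => simp [pvDhlPrefixes, pv_sw_take, pvDhlFallback]
  | [c0, c1] => simp [pvDhlPrefixes, pv_sw_take, pvDhlFallback]
  | c0 :: c1 :: c2 :: t =>
    show (if pvDhlPrefixes.any (fun p => PySem.Chars.startswith (c0 :: c1 :: c2 :: t) p) then "DHL" else "Unknown") = _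
    by_cases hB : (c0 == c1 && c1 == c2 && PySem.Chars.isdigit c0) = true
    · obtain ⟨⟨h01, h12⟩, hd⟩ := by simpa [Bool.and_eq_true, beq_iff_eq] using hB
      subst h01; subst h12
      obtain ⟨hlo, hhi⟩ := pv_digit_bounds hd
      have h10 : c0.toNat = 48 ∨ c0.toNat = 49 ∨ c0.toNat = 50 ∨ c0.toNat = 51 ∨ c0.toNat = 52 ∨ c0.toNat = 53 ∨ c0.toNat = 54 ∨ c0.toNat = 55 ∨ c0.toNat = 56 ∨ c0.toNat = 57 := by omega
      simp only [pvDhlFallback, hB, if_pos]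
      rcases h10 with h|h|h|h|h|h|h|h|h|h <;>
        (rw [pv_char_of_toNat h]; simp [pvDhlPrefixes, pv_sw_take])
    · have hany : pvDhlPrefixes.any (fun p => PySem.Chars.startswith (c0 :: c1 :: c2 :: t) p) = false := by
        rw [Bool.eq_false_iff]
        intro hA
        simp only [pvDhlPrefixes, List.any_cons, List.any_nil, pv_sw_take, Bool.or_eq_true,
          decide_eq_true_eq, Bool.false_eq_true, or_false] at hA
        apply hB
        rcases hA with h|h|h|h|h|h|h|h|h|h <;>
          (simp at h
           obtain ⟨e0, e1, e2⟩ := h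
           subst e0; subst e1; subst e2
           decide)
      simp [pvDhlFallback, hB, hany]
def pvV (h : List Char) : Int := h.foldl (fun n c => 10 * n + ((c.toNat : Int) - 48)) 0

lemma pv_core2 (L : List Char) :
    (if pvFedexPrefixes.any (fun p => PySem.Chars.startswith L p) then "FedEx"
     else if pvUspsPrefixes.any (fun p => PySem.Chars.startswith L p) then "USPS"
     else if pvDhlPrefixes.any (fun p => PySem.Chars.startswith L p) then "DHL"
     else "Unknown")
    = (if PySem.Chars.strIsdigit (L.take 4) then
         if 7946 ≤ pvV (L.take 4) ∧ pvV (L.take 4) ≤ 7955 then "FedEx"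
         else if (9400 ≤ pvV (L.take 4) ∧ pvV (L.take 4) ≤ 9409) ∨ pvV (L.take 4) = 9205 ∨ pvV (L.take 4) = 9301 ∨ pvV (L.take 4) = 9303 then "USPS"
         else pvDhlFallback L
       else pvDhlFallback L) := by
  match L with
  | [] => simp [pvFedexPrefixes, pvUspsPrefixes, pvDhlPrefixes, pv_sw_take,
      PySem.Chars.strIsdigit, pvDhlFallback]
  | [a] =>
    have hfed : pvFedexPrefixes.any (fun p => PySem.Chars.startswith [a] p) = false := by
      simp [pvFedexPrefixes, pv_sw_take]
    have husps : pvUspsPrefixes.any (fun p => PySem.Chars.startswith [a] p) = false := by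
      simp [pvUspsPrefixes, pv_sw_take]
    rw [hfed, husps, if_neg (by simp), if_neg (by simp), pv_dhl]
    by_cases hd : PySem.Chars.strIsdigit (List.take 4 [a]) = true
    · rw [if_pos hd]
      simp only [List.take, PySem.Chars.strIsdigit, List.all_cons, List.all_nil,
        Bool.and_eq_true, List.isEmpty_cons, Bool.not_false, true_and, and_true] at hd
      obtain ⟨h1, h2⟩ := pv_digit_bounds hd
      rw [if_neg (by simp [pvV]; omega),
          if_neg (by simp [pvV]; omega)]
    · rw [if_neg hd]
  | [a, b] =>
    have hfed : pvFedexPrefixes.any (fun p => PySem.Chars.startswith [a, b] p) = false := by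
      simp [pvFedexPrefixes, pv_sw_take]
    have husps : pvUspsPrefixes.any (fun p => PySem.Chars.startswith [a, b] p) = false := by
      simp [pvUspsPrefixes, pv_sw_take]
    rw [hfed, husps, if_neg (by simp), if_neg (by simp), pv_dhl]
    by_cases hd : PySem.Chars.strIsdigit (List.take 4 [a, b]) = true
    · rw [if_pos hd]
      simp only [List.take, PySem.Chars.strIsdigit, List.all_cons, List.all_nil,
        Bool.and_eq_true, List.isEmpty_cons, Bool.not_false, true_and, and_true] at hd
      obtain ⟨hda, hdb⟩ := hd
      obtain ⟨h1, h2⟩ := pv_digit_bounds hda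
      obtain ⟨h3, h4⟩ := pv_digit_bounds hdb
      rw [if_neg (by simp [pvV]; omega),
          if_neg (by simp [pvV]; omega)]
    · rw [if_neg hd]
  | [a, b, c] =>
    have hfed : pvFedexPrefixes.any (fun p => PySem.Chars.startswith [a, b, c] p) = false := by
      simp [pvFedexPrefixes, pv_sw_take]
    have husps : pvUspsPrefixes.any (fun p => PySem.Chars.startswith [a, b, c] p) = false := by
      simp [pvUspsPrefixes, pv_sw_take]
    rw [hfed, husps, if_neg (by simp), if_neg (by simp), pv_dhl]
    by_cases hd : PySem.Chars.strIsdigit (List.take 4 [a, b, c]) = true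
    · rw [if_pos hd]
      simp only [List.take, PySem.Chars.strIsdigit, List.all_cons, List.all_nil,
        Bool.and_eq_true, List.isEmpty_cons, Bool.not_false, true_and, and_true] at hd
      obtain ⟨hda, hdb, hdc⟩ := hd
      obtain ⟨h1, h2⟩ := pv_digit_bounds hda
      obtain ⟨h3, h4⟩ := pv_digit_bounds hdb
      obtain ⟨h5, h6⟩ := pv_digit_bounds hdc
      rw [if_neg (by simp [pvV]; omega),
          if_neg (by simp [pvV]; omega)]
    · rw [if_neg hd]
  | a :: b :: c :: d :: t =>
    have ht4 : List.take 4 (a :: b :: c :: d :: t) = [a, b, c, d] := by simp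
    rw [ht4]
    by_cases hd4 : PySem.Chars.strIsdigit [a, b, c, d] = true
    · rw [if_pos hd4]
      have hd4' := hd4
      simp only [PySem.Chars.strIsdigit, List.all_cons, List.all_nil, Bool.and_eq_true,
        List.isEmpty_cons, Bool.not_false, true_and, and_true] at hd4'
      obtain ⟨hda, hdb, hdc, hdd⟩ := hd4'
      obtain ⟨ha1, ha2⟩ := pv_digit_bounds hda
      obtain ⟨hb1, hb2⟩ := pv_digit_bounds hdb
      obtain ⟨hc1, hc2⟩ := pv_digit_bounds hdc
      obtain ⟨hd1, hd2⟩ := pv_digit_bounds hdd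
      have hv : pvV [a, b, c, d]
          = 1000 * (a.toNat : Int) + 100 * (b.toNat : Int) + 10 * (c.toNat : Int) + (d.toNat : Int) - 53328 := by
        simp [pvV]; ring
      by_cases hf : 7946 ≤ pvV [a, b, c, d] ∧ pvV [a, b, c, d] ≤ 7955
      · rw [if_pos hf]
        obtain ⟨hf1, hf2⟩ := hf
        rw [hv] at hf1 hf2
        have ha' : a = '7' := pv_char_eq (by show a.toNat = 55; omega)
        have hb' : b = '9' := pv_char_eq (by show b.toNat = 57; omega)
        have hmem : pvFedexPrefixes.any (fun p => PySem.Chars.startswith (a :: b :: c :: d :: t) p) = true := by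
          rcases (by omega : c.toNat = 52 ∨ c.toNat = 53) with hc|hc
          · have hc' : c = '4' := pv_char_eq (by show c.toNat = 52; omega)
            rcases (by omega : d.toNat = 54 ∨ d.toNat = 55 ∨ d.toNat = 56 ∨ d.toNat = 57) with hdn|hdn|hdn|hdn
            · have hd' : d = '6' := pv_char_eq (by show d.toNat = 54; omega)
              simp [pvFedexPrefixes, pv_sw_take, ha', hb', hc', hd']
            · have hd' : d = '7' := pv_char_eq (by show d.toNat = 55; omega)
              simp [pvFedexPrefixes, pv_sw_take, ha', hb', hc', hd']
            · have hd' : d = '8' := pv_char_eq (by show d.toNat = 56; omega)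
              simp [pvFedexPrefixes, pv_sw_take, ha', hb', hc', hd']
            · have hd' : d = '9' := pv_char_eq (by show d.toNat = 57; omega)
              simp [pvFedexPrefixes, pv_sw_take, ha', hb', hc', hd']
          · have hc' : c = '5' := pv_char_eq (by show c.toNat = 53; omega)
            rcases (by omega : d.toNat = 48 ∨ d.toNat = 49 ∨ d.toNat = 50 ∨ d.toNat = 51 ∨ d.toNat = 52 ∨ d.toNat = 53) with hdn|hdn|hdn|hdn|hdn|hdn
            · have hd' : d = '0' := pv_char_eq (by show d.toNat = 48; omega)
              simp [pvFedexPrefixes, pv_sw_take, ha', hb', hc', hd']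
            · have hd' : d = '1' := pv_char_eq (by show d.toNat = 49; omega)
              simp [pvFedexPrefixes, pv_sw_take, ha', hb', hc', hd']
            · have hd' : d = '2' := pv_char_eq (by show d.toNat = 50; omega)
              simp [pvFedexPrefixes, pv_sw_take, ha', hb', hc', hd']
            · have hd' : d = '3' := pv_char_eq (by show d.toNat = 51; omega)
              simp [pvFedexPrefixes, pv_sw_take, ha', hb', hc', hd']
            · have hd' : d = '4' := pv_char_eq (by show d.toNat = 52; omega)
              simp [pvFedexPrefixes, pv_sw_take, ha', hb', hc', hd']
            · have hd' : d = '5' := pv_char_eq (by show d.toNat = 53; omega)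
              simp [pvFedexPrefixes, pv_sw_take, ha', hb', hc', hd']
        rw [if_pos hmem]
      · rw [if_neg hf]
        by_cases hu : (9400 ≤ pvV [a, b, c, d] ∧ pvV [a, b, c, d] ≤ 9409) ∨ pvV [a, b, c, d] = 9205 ∨ pvV [a, b, c, d] = 9301 ∨ pvV [a, b, c, d] = 9303
        · rw [if_pos hu]
          rw [hv] at hu
          have ha' : a = '9' := pv_char_eq (by show a.toNat = 57; omega)
          have hfeda : pvFedexPrefixes.any (fun p => PySem.Chars.startswith (a :: b :: c :: d :: t) p) = false := by
            simp [pvFedexPrefixes, pv_sw_take, ha']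
          have hmem : pvUspsPrefixes.any (fun p => PySem.Chars.startswith (a :: b :: c :: d :: t) p) = true := by
            rcases hu with ⟨hu1, hu2⟩|hu|hu|hu
            · have hb' : b = '4' := pv_char_eq (by show b.toNat = 52; omega)
              have hc' : c = '0' := pv_char_eq (by show c.toNat = 48; omega)
              rcases (by omega : d.toNat = 48 ∨ d.toNat = 49 ∨ d.toNat = 50 ∨ d.toNat = 51 ∨ d.toNat = 52 ∨ d.toNat = 53 ∨ d.toNat = 54 ∨ d.toNat = 55 ∨ d.toNat = 56 ∨ d.toNat = 57) with hdn|hdn|hdn|hdn|hdn|hdn|hdn|hdn|hdn|hdn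
              · have hd' : d = '0' := pv_char_eq (by show d.toNat = 48; omega)
                simp [pvUspsPrefixes, pv_sw_take, ha', hb', hc', hd']
              · have hd' : d = '1' := pv_char_eq (by show d.toNat = 49; omega)
                simp [pvUspsPrefixes, pv_sw_take, ha', hb', hc', hd']
              · have hd' : d = '2' := pv_char_eq (by show d.toNat = 50; omega)
                simp [pvUspsPrefixes, pv_sw_take, ha', hb', hc', hd']
              · have hd' : d = '3' := pv_char_eq (by show d.toNat = 51; omega)
                simp [pvUspsPrefixes, pv_sw_take, ha', hb', hc', hd']
              · have hd' : d = '4' := pv_char_eq (by show d.toNat = 52; omega)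
                simp [pvUspsPrefixes, pv_sw_take, ha', hb', hc', hd']
              · have hd' : d = '5' := pv_char_eq (by show d.toNat = 53; omega)
                simp [pvUspsPrefixes, pv_sw_take, ha', hb', hc', hd']
              · have hd' : d = '6' := pv_char_eq (by show d.toNat = 54; omega)
                simp [pvUspsPrefixes, pv_sw_take, ha', hb', hc', hd']
              · have hd' : d = '7' := pv_char_eq (by show d.toNat = 55; omega)
                simp [pvUspsPrefixes, pv_sw_take, ha', hb', hc', hd']
              · have hd' : d = '8' := pv_char_eq (by show d.toNat = 56; omega)
                simp [pvUspsPrefixes, pv_sw_take, ha', hb', hc', hd']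
              · have hd' : d = '9' := pv_char_eq (by show d.toNat = 57; omega)
                simp [pvUspsPrefixes, pv_sw_take, ha', hb', hc', hd']
            · have hb' : b = '2' := pv_char_eq (by show b.toNat = 50; omega)
              have hc' : c = '0' := pv_char_eq (by show c.toNat = 48; omega)
              have hd' : d = '5' := pv_char_eq (by show d.toNat = 53; omega)
              simp [pvUspsPrefixes, pv_sw_take, ha', hb', hc', hd']
            · have hb' : b = '3' := pv_char_eq (by show b.toNat = 51; omega)
              have hc' : c = '0' := pv_char_eq (by show c.toNat = 48; omega)
              have hd' : d = '1' := pv_char_eq (by show d.toNat = 49; omega)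
              simp [pvUspsPrefixes, pv_sw_take, ha', hb', hc', hd']
            · have hb' : b = '3' := pv_char_eq (by show b.toNat = 51; omega)
              have hc' : c = '0' := pv_char_eq (by show c.toNat = 48; omega)
              have hd' : d = '3' := pv_char_eq (by show d.toNat = 51; omega)
              simp [pvUspsPrefixes, pv_sw_take, ha', hb', hc', hd']
          rw [hfeda, if_neg (by simp), hmem, if_pos rfl]
        · rw [if_neg hu]
          have hfeda : pvFedexPrefixes.any (fun p => PySem.Chars.startswith (a :: b :: c :: d :: t) p) = false := by
            rw [Bool.eq_false_iff]
            intro hA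
            simp only [pvFedexPrefixes, List.any_cons, List.any_nil, pv_sw_take, Bool.or_eq_true,
              decide_eq_true_eq, Bool.false_eq_true, or_false] at hA
            rcases hA with h|h|h|h|h|h|h|h|h|h <;>
              (simp at h
               obtain ⟨e0, e1, e2, e3⟩ := h
               subst e0; subst e1; subst e2; subst e3
               exact hf (by rw [hv]; exact ⟨by decide, by decide⟩))
          have huspsa : pvUspsPrefixes.any (fun p => PySem.Chars.startswith (a :: b :: c :: d :: t) p) = false := by
            rw [Bool.eq_false_iff]
            intro hA
            simp only [pvUspsPrefixes, List.any_cons, List.any_nil, pv_sw_take, Bool.or_eq_true,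
              decide_eq_true_eq, Bool.false_eq_true, or_false] at hA
            rcases hA with h|h|h|h|h|h|h|h|h|h|h|h|h <;>
              (simp at h
               obtain ⟨e0, e1, e2, e3⟩ := h
               subst e0; subst e1; subst e2; subst e3
               exact hu (by rw [hv]; decide))
          rw [hfeda, huspsa, if_neg (by simp), if_neg (by simp), pv_dhl]
    · rw [if_neg hd4]
      have hfeda : pvFedexPrefixes.any (fun p => PySem.Chars.startswith (a :: b :: c :: d :: t) p) = false := by
        rw [Bool.eq_false_iff]
        intro hA
        simp only [pvFedexPrefixes, List.any_cons, List.any_nil, pv_sw_take, Bool.or_eq_true,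
          decide_eq_true_eq, Bool.false_eq_true, or_false] at hA
        rcases hA with h|h|h|h|h|h|h|h|h|h <;>
          (simp at h
           obtain ⟨e0, e1, e2, e3⟩ := h
           subst e0; subst e1; subst e2; subst e3
           exact hd4 (by decide))
      have huspsa : pvUspsPrefixes.any (fun p => PySem.Chars.startswith (a :: b :: c :: d :: t) p) = false := by
        rw [Bool.eq_false_iff]
        intro hA
        simp only [pvUspsPrefixes, List.any_cons, List.any_nil, pv_sw_take, Bool.or_eq_true,
          decide_eq_true_eq, Bool.false_eq_true, or_false] at hA
        rcases hA with h|h|h|h|h|h|h|h|h|h|h|h|h <;>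
          (simp at h
           obtain ⟨e0, e1, e2, e3⟩ := h
           subst e0; subst e1; subst e2; subst e3
           exact hd4 (by decide))
      rw [hfeda, huspsa, if_neg (by simp), if_neg (by simp), pv_dhl]

-- the core of the two programs agrees on any cleaned character list
lemma pv_core (L : List Char) :
    (if PySem.Chars.startswith L "1Z".toList && L.length == 18 then "UPS"
     else if pvFedexPrefixes.any (fun p => PySem.Chars.startswith L p) then "FedEx"
     else if pvUspsPrefixes.any (fun p => PySem.Chars.startswith L p) then "USPS"
     else if pvDhlPrefixes.any (fun p => PySem.Chars.startswith L p) then "DHL"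
     else "Unknown")
    = (if PySem.Chars.startswith L "1Z".toList && L.length == 18 then "UPS"
       else
         let head := PySem.List.slice L none (some 4)
         if PySem.Chars.strIsdigit head then
           let n : Int := head.foldl (fun n c => 10 * n + ((c.toNat : Int) - 48)) 0
           if 7946 ≤ n ∧ n ≤ 7955 then "FedEx"
           else if (9400 ≤ n ∧ n ≤ 9409) ∨ n = 9205 ∨ n = 9301 ∨ n = 9303 then "USPS"
           else pvDhlFallback L
         else pvDhlFallback L) := by
  by_cases h1 : (PySem.Chars.startswith L "1Z".toList && L.length == 18) = true
  · rw [if_pos h1, if_pos h1]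
  · rw [if_neg h1, if_neg h1]
    have hs4 : PySem.List.slice L none (some 4) = L.take 4 := by simp [pysem]
    simpa only [hs4] using pv_core2 L

-- ===== VERDICT (by name: the statement is the Claim_ definition above) =====
theorem detect_carrier_from_tracking_number_py_spec : Claim_equal_detect_carrier_from_tracking_number_py := by
  intro s _
  unfold Spec_detect_carrier_from_tracking_number_py
  unfold detect_carrier_from_tracking_number_py detect_carrier_from_tracking_number_py_alt
  exact pv_core (PySem.Chars.upper (s.toList.filter PySem.Chars.isalnum))
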